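-- pv_equiv track=rewrite | github.com/sandyeveliz/acervo | acervo/graph_synthesizer.py | _group_files_by_directory
-- ===== SOURCE A (Python) =====
-- def _group_files_by_directory(file_nodes: list[dict]) -> dict[str, list[dict]]:
--     """Group file nodes by their top-level directory."""
--     groups: dict[str, list[dict]] = {}
--
--     for node in file_nodes:
--         path = node.get("attributes", {}).get("path", "")
--         parts = path.split("/")
--         # Use the first directory level as the group name
--         group = parts[0] if len(parts) > 1 else "(root)"
--         groups.setdefault(group, []).append(node)
--
--     return groups
-- ===== SOURCE B (Python) =====
-- def _top_level(node):
--     path = node.get("attributes", {}).get("path", "")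
--     i = path.find("/")
--     return path[:i] if i >= 0 else "(root)"
--
--
-- def _group_files_by_directory(file_nodes: list[dict]) -> dict[str, list[dict]]:
--     """Group file nodes by top-level directory: ordered distinct group names
--     (key found by locating the first '/'), then one filter per group."""
--     names = list(dict.fromkeys(_top_level(n) for n in file_nodes))
--     return {g: [n for n in file_nodes if _top_level(n) == g] for g in names}
-- ===== Notes on version B (the rewrite author's own statement) =====
-- stated objective: alternative
-- what changed: Replaces A's single setdefault-and-append accumulation over a mutable dict with a two-pass scheme (ordered distinct group names via dict.fromkeys, then one filter comprehension per group), and computes the group key by locating the first '/' with str.find and slicing instead of splitting the whole path.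
import Mathlib
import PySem

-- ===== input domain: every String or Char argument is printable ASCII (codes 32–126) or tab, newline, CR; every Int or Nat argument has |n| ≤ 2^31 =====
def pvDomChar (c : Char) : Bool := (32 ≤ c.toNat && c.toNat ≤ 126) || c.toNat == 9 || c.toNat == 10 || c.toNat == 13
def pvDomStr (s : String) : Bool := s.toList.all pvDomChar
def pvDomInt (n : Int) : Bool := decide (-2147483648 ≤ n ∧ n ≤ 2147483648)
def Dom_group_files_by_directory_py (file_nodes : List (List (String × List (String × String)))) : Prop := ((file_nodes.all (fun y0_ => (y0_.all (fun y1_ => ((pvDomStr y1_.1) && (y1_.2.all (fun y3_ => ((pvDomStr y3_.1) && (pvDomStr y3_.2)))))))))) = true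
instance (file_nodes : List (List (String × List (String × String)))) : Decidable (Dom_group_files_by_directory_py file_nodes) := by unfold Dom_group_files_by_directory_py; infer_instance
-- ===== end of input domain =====

-- B replaces A's single setdefault/append accumulation pass by a two-pass scheme
-- (ordered distinct group names, then one filter per group) and computes the key by
-- locating the first '/' with find/slice instead of splitting; objective: alternative.

-- ===== PORT A =====
-- for node in file_nodes: path = node.get("attributes", {}).get("path", "");
-- parts = path.split("/"); group = parts[0] if len(parts) > 1 else "(root)";
-- groups.setdefault(group, []).append(node)   (split? is some here: "/" is nonempty;
-- setdefault(g, []).append(node) appends node to the list stored at g, [] if absent)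
def group_files_by_directory_py (file_nodes : List (List (String × List (String × String)))) : List (String × List (List (String × List (String × String)))) :=
  (file_nodes.foldl
    (fun (groups : PySem.Dict String (List (List (String × List (String × String))))) node =>
      let path := (PySem.Dict.mk ((PySem.Dict.mk node).getD "attributes" [])).getD "path" ""
      let parts := (PySem.Str.split? path "/").getD []
      let group := if 1 < parts.length then parts.getD 0 "" else "(root)"
      groups.modify group [] (fun l => l ++ [node]))
    PySem.Dict.empty).items

-- ===== PORT B =====
-- def _top_level(node): path = …; i = path.find("/"); return path[:i] if i >= 0 else "(root)"
def pvTopLevel (node : List (String × List (String × String))) : String :=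
  let path := (PySem.Dict.mk ((PySem.Dict.mk node).getD "attributes" [])).getD "path" ""
  let i := PySem.Str.find path "/"
  if 0 ≤ i then PySem.Str.slice path none (some i) else "(root)"

-- names = list(dict.fromkeys(_top_level(n) for n in file_nodes));
-- return {g: [n for n in file_nodes if _top_level(n) == g] for g in names}
def group_files_by_directory_py_alt (file_nodes : List (List (String × List (String × String)))) : List (String × List (List (String × List (String × String)))) :=
  (PySem.List.dedup (file_nodes.map pvTopLevel)).map
    (fun g => (g, file_nodes.filter (fun n => pvTopLevel n == g)))

-- ===== PRECONDITION & SPEC =====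
def Spec_group_files_by_directory_py (file_nodes : List (List (String × List (String × String)))) (out : List (String × List (List (String × List (String × String))))) : Prop := out = group_files_by_directory_py_alt file_nodes
-- instance search alone hits its depth limit on this deeply nested type, so it is assembled stepwise
instance (file_nodes : List (List (String × List (String × String)))) (out : List (String × List (List (String × List (String × String))))) : Decidable (Spec_group_files_by_directory_py file_nodes out) := by
  unfold Spec_group_files_by_directory_py
  letI h2 : DecidableEq (List (List (String × List (String × String)))) := inferInstance
  letI h3 : DecidableEq (String × List (List (String × List (String × String)))) := inferInstance
  letI h4 : DecidableEq (List (String × List (List (String × List (String × String))))) := inferInstance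
  exact h4 _ _

-- ===== CLAIM =====
def Claim_equal_group_files_by_directory_py : Prop := ∀ (file_nodes : List (List (String × List (String × String)))), Dom_group_files_by_directory_py file_nodes → Spec_group_files_by_directory_py file_nodes (group_files_by_directory_py file_nodes)

-- ===== LEMMAS AND PROOFS =====


theorem pv_findGo (c : Char) (l : List Char) : ∀ k : Nat,
    PySem.Chars.find.go [c] l k =
      if c ∈ l then (k + (l.takeWhile (fun x => x != c)).length : Int) else -1 := by
  induction l with
  | nil => intro k; simp [PySem.Chars.find.go]
  | cons a rest ih =>
    intro k
    by_cases hac : a = c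
    · subst hac
      simp [PySem.Chars.find.go, List.isPrefixOf]
    · have hpre : ([c].isPrefixOf (a :: rest)) = false := by
        simp [List.isPrefixOf]; exact fun h => (hac h.symm).elim
      have hne : (a != c) = true := bne_iff_ne.mpr hac
      have hmem : c ∈ a :: rest ↔ c ∈ rest :=
        List.mem_cons.trans (or_iff_right (fun h => hac h.symm))
      simp only [PySem.Chars.find.go, hpre, Bool.false_eq_true, if_false, ih (k + 1),
        hmem, List.takeWhile_cons, hne, if_true, List.length_cons]
      by_cases hm : c ∈ rest
      · simp only [hm, if_true]; push_cast; ring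
      · simp [hm]

theorem pv_splitGo (c : Char) (n : Nat) : ∀ (l cur : List Char) (acc : List (List Char)) (fuel : Nat),
    l.length ≤ n → l.length ≤ fuel →
    PySem.Chars.splitOn.go [c] fuel l cur acc =
      acc.reverse ++ (cur.reverse ++ l.takeWhile (fun x => x != c)) ::
        (if c ∈ l then PySem.Chars.splitOn ((l.dropWhile (fun x => x != c)).drop 1) [c] else []) := by
  induction n using Nat.strong_induction_on with
  | _ n ih =>
    intro l cur acc fuel hn hf
    match fuel, l with
    | 0, l =>
      have : l = [] := List.eq_nil_of_length_eq_zero (Nat.le_zero.mp hf)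
      subst this
      rw [PySem.Chars.splitOn.go]; simp
    | fuel+1, [] =>
      rw [PySem.Chars.splitOn.go] <;> simp
    | fuel+1, a :: rest =>
      rw [PySem.Chars.splitOn.go]
      simp only [List.length_cons] at hn hf
      have hrn : rest.length < n := by omega
      by_cases hac : a = c
      · subst hac
        have hpre : ([a].isPrefixOf (a :: rest)) = true := by simp [List.isPrefixOf]
        rw [hpre]
        have hdrop : List.drop [a].length (a :: rest) = rest := by simp
        rw [if_pos rfl, hdrop,
          ih rest.length hrn rest [] (cur.reverse :: acc) fuel le_rfl (by omega)]
        have hsplit : PySem.Chars.splitOn rest [a] =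
            (rest.takeWhile (fun x => x != a)) ::
              (if a ∈ rest then PySem.Chars.splitOn ((rest.dropWhile (fun x => x != a)).drop 1) [a] else []) := by
          rw [show PySem.Chars.splitOn rest [a]
                = PySem.Chars.splitOn.go [a] (rest.length + 1) rest [] [] from rfl,
            ih rest.length hrn rest [] [] (rest.length + 1) le_rfl (by omega)]
          simp only [List.reverse_nil, List.nil_append]
        have htw : List.takeWhile (fun x => x != a) (a :: rest) = [] := by simp
        have hdw : List.dropWhile (fun x => x != a) (a :: rest) = a :: rest := by simp
        rw [htw, hdw, if_pos (List.mem_cons_self ..), show List.drop 1 (a :: rest) = rest from rfl, hsplit]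
        simp only [List.reverse_cons, List.reverse_nil, List.nil_append, List.append_nil,
          List.append_assoc, List.cons_append]
      · have hpre : ([c].isPrefixOf (a :: rest)) = false := by
          simp [List.isPrefixOf]; exact fun h => (hac h.symm).elim
        rw [hpre]
        simp only [Bool.false_eq_true, if_false]
        rw [ih rest.length hrn rest (a :: cur) acc fuel le_rfl (by omega)]
        have hne : (a != c) = true := bne_iff_ne.mpr hac
        have hmem : c ∈ a :: rest ↔ c ∈ rest :=
          List.mem_cons.trans (or_iff_right (fun h => hac h.symm))
        simp [hne, hmem]

theorem pv_splitOn_single (c : Char) (l : List Char) :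
    PySem.Chars.splitOn l [c] =
      (l.takeWhile (fun x => x != c)) ::
        (if c ∈ l then PySem.Chars.splitOn ((l.dropWhile (fun x => x != c)).drop 1) [c] else []) := by
  unfold PySem.Chars.splitOn
  rw [pv_splitGo c l.length l [] [] (l.length + 1) le_rfl (by omega)]
  rfl

def keyA (path : String) : String :=
  if 1 < ((PySem.Str.split? path "/").getD []).length
  then ((PySem.Str.split? path "/").getD []).getD 0 "" else "(root)"

def keyB (path : String) : String :=
  if 0 ≤ PySem.Str.find path "/"
  then PySem.Str.slice path none (some (PySem.Str.find path "/")) else "(root)"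

theorem pv_key_eq (path : String) : keyA path = keyB path := by
  have hsplit : PySem.Str.split? path "/" =
      some ((PySem.Chars.splitOn path.toList ['/']).map String.ofList) := by
    simp [PySem.Str.split?, PySem.Chars.split?]
  have hfind : PySem.Str.find path "/" =
      (if '/' ∈ path.toList
        then ((path.toList.takeWhile (fun x => x != '/')).length : Int) else -1) := by
    rw [PySem.Str.find_eq, show ("/" : String).toList = ['/'] from rfl]
    show PySem.Chars.find.go _ _ 0 = _
    rw [pv_findGo '/' path.toList 0]
    simp
  by_cases hm : '/' ∈ path.toList
  · have hfind' : PySem.Str.find path "/" =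
        ((path.toList.takeWhile (fun x => x != '/')).length : Int) := by
      rw [hfind, if_pos hm]
    have htail : PySem.Chars.splitOn ((path.toList.dropWhile (fun x => x != '/')).drop 1) ['/'] =
        _ :: _ := pv_splitOn_single '/' _
    unfold keyA keyB
    rw [hsplit, hfind', pv_splitOn_single '/' path.toList, if_pos hm, htail, Option.getD_some,
      if_pos (show 1 < (List.map String.ofList (_ :: _ :: _)).length by
        simp only [List.map_cons, List.length_cons]; omega),
      if_pos (Int.natCast_nonneg _), List.map_cons, List.getD_cons_zero]
    have hslice : (PySem.Str.slice path none
          (some ((path.toList.takeWhile (fun x => x != '/')).length : Int))).toList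
        = path.toList.takeWhile (fun x => x != '/') := by
      rw [PySem.Str.toList_slice]
      show PySem.List.slice _ _ _ = _
      rw [PySem.List.slice_to _ (Int.natCast_nonneg _)]
      simp only [Int.toNat_natCast]
      exact ((List.prefix_iff_eq_take).mp (List.takeWhile_prefix _)).symm
    calc String.ofList (path.toList.takeWhile (fun x => x != '/'))
        = String.ofList ((PySem.Str.slice path none
            (some ((path.toList.takeWhile (fun x => x != '/')).length : Int))).toList) := by
          rw [hslice]
      _ = _ := String.ofList_toList
  · have hfind' : PySem.Str.find path "/" = -1 := by rw [hfind, if_neg hm]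
    unfold keyA keyB
    rw [hsplit, hfind', pv_splitOn_single '/' path.toList, if_neg hm, Option.getD_some]
    simp only [List.map_cons, List.map_nil, List.length_singleton]
    rw [if_neg (by omega), if_neg (by omega)]


-- the path both Pythons read off a node
def pvPath (node : List (String × List (String × String))) : String :=
  (PySem.Dict.mk ((PySem.Dict.mk node).getD "attributes" [])).getD "path" ""

theorem pv_topLevel_eq (node : List (String × List (String × String))) :
    keyA (pvPath node) = pvTopLevel node := pv_key_eq (pvPath node)

-- A's fold, with the inline key computation factored through keyA ∘ pvPath (definitional)
theorem pv_foldA (fn : List (List (String × List (String × String)))) :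
    fn.foldl
        (fun (groups : PySem.Dict String (List (List (String × List (String × String))))) node =>
          let path := (PySem.Dict.mk ((PySem.Dict.mk node).getD "attributes" [])).getD "path" ""
          let parts := (PySem.Str.split? path "/").getD []
          let group := if 1 < parts.length then parts.getD 0 "" else "(root)"
          groups.modify group [] (fun l => l ++ [node]))
        PySem.Dict.empty
      = fn.foldl
        (fun (groups : PySem.Dict String (List (List (String × List (String × String))))) node =>
          groups.modify (pvTopLevel node) [] (fun l => l ++ [node]))
        PySem.Dict.empty := by
  have : (fun (groups : PySem.Dict String (List (List (String × List (String × String))))) node =>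
      groups.modify (keyA (pvPath node)) [] (fun l => l ++ [node]))
    = (fun (groups : PySem.Dict String (List (List (String × List (String × String))))) node =>
      groups.modify (pvTopLevel node) [] (fun l => l ++ [node])) := by
    funext groups node
    rw [pv_topLevel_eq]
  exact this ▸ rfl

theorem pv_keys (fn : List (List (String × List (String × String)))) :
    (fn.foldl
        (fun (groups : PySem.Dict String (List (List (String × List (String × String))))) node =>
          groups.modify (pvTopLevel node) [] (fun l => l ++ [node])) PySem.Dict.empty).keys
      = PySem.List.dedup (fn.map pvTopLevel) := by
  rw [PySem.Dict.keys_foldl_modify_key]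
  simp [PySem.Set.update_nil_left]

theorem pv_getD (fn : List (List (String × List (String × String)))) (k : String) :
    (fn.foldl
        (fun (groups : PySem.Dict String (List (List (String × List (String × String))))) node =>
          groups.modify (pvTopLevel node) [] (fun l => l ++ [node])) PySem.Dict.empty).getD k []
      = fn.filter (fun n => pvTopLevel n == k) := by
  have := PySem.Dict.getD_foldl_modify_append (fn.map (fun n => (pvTopLevel n, n)))
    (PySem.Dict.empty : PySem.Dict String (List (List (String × List (String × String))))) k
  rw [List.foldl_map] at this
  rw [this]
  simp [List.filter_map, Function.comp_def]

theorem pv_main (fn : List (List (String × List (String × String)))) :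
    group_files_by_directory_py fn = group_files_by_directory_py_alt fn := by
  unfold group_files_by_directory_py group_files_by_directory_py_alt
  rw [pv_foldA fn]
  have hnodup : (fn.foldl
      (fun (groups : PySem.Dict String (List (List (String × List (String × String))))) node =>
        groups.modify (pvTopLevel node) [] (fun l => l ++ [node])) PySem.Dict.empty).keys.Nodup := by
    rw [pv_keys]
    exact PySem.List.nodup_dedup _
  rw [PySem.Dict.items_eq_map_keys _ hnodup
      ([] : List (List (String × List (String × String)))),
    pv_keys]
  exact List.map_congr_left (fun g _ => by rw [pv_getD fn g])

-- ===== VERDICT =====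
theorem group_files_by_directory_py_spec : Claim_equal_group_files_by_directory_py := by
  intro fn _
  unfold Spec_group_files_by_directory_py
  exact pv_main fn
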